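-- pv_equiv track=rewrite | github.com/Superbia101/Open_Library | Python/func/second_max.py | second_max_modified
-- ===== SOURCE A (Python) =====
-- def second_max_modified(list_num: list | tuple) -> list[tuple]:
--     """Функция возвращает первый и второй максимум и, их индексы из списка.
--
--     :param list_num: Список значений
--     :type list_num: list | tuple
--
--     :rtype: list[tuple]
--     :return: Максимумы списка: 1-й, его индекс и 2-рой, и его индекс
--     """
--
--     first, second = list_num[:2]  # Берём первое и второе значение из списка
--     f_index, s_index = 0, 1  # Значения индексов
--
--     if first < second:  # Распределяем их
--         first, second = second, first
--         f_index, s_index = 1, 0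
--
--     for i in range(2, len(list_num)):  # Сравниваем все значения с 1-вым макс
--         if first < list_num[i]:
--             first, second = list_num[i], first  # Заменяем на большие
--             f_index, s_index = i, f_index  # Их индексы тоже
--         elif second < list_num[i]:  # Сравниваем 2-той
--             second = list_num[i]
--             s_index = i
--
--     return [(first, f_index), (second, s_index)]
-- ===== SOURCE B (Python) =====
-- def second_max_modified(list_num: list | tuple) -> list[tuple]:
--     """Two-pass version: earliest maximum first, then the runner-up over the rest."""
--     if len(list_num) < 2:
--         raise ValueError("need at least two values")
--     f_val = max(list_num)
--     f_index = list_num.index(f_val)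
--     best = None
--     for i, v in enumerate(list_num):
--         if i == f_index:
--             continue
--         if best is None or best[0] < v:
--             best = (v, i)
--     return [(f_val, f_index), best]
-- ===== Notes on version B (the rewrite author's own statement) =====
-- stated objective: simpler
-- what changed: A's single loop threading four mutable variables (first, second, f_index, s_index) with a pre-swap of the first two elements is replaced by two independent passes: max()+list.index() give the first maximum and its earliest index, then one enumerate pass skipping that index tracks the strict running maximum for the runner-up.
import Mathlib
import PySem

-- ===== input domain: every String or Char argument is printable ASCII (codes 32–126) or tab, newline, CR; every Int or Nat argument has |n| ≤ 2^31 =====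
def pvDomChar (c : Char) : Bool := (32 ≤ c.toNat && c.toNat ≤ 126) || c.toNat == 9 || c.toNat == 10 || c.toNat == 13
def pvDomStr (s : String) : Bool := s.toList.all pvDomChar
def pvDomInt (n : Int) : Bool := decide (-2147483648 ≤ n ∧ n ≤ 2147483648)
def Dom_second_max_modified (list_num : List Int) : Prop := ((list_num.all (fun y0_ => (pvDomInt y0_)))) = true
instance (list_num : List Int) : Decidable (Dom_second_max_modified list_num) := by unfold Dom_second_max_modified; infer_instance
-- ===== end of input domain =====

-- B replaces A's single four-variable tracking loop by two independent passes (max+index, then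
-- runner-up skipping that index); objective: simpler decomposition, same O(n) cost.

-- ===== PORT A =====
-- loop body of A's for-loop, named for use in the proofs (same state, same branches)
def aStep (list_num : List Int) (st : Int × Int × Int × Int) (i : Int) : Int × Int × Int × Int :=
  match st with
  | (first, second, f_index, s_index) =>
    if first < PySem.List.pyGetD list_num i 0 then
      (PySem.List.pyGetD list_num i 0, first, i, f_index)
    else if second < PySem.List.pyGetD list_num i 0 then
      (first, PySem.List.pyGetD list_num i 0, f_index, i)
    else (first, second, f_index, s_index)

def second_max_modified (list_num : List Int) : List (Int × Int) :=
  match list_num with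
  | first :: second :: _ =>
    let st0 : Int × Int × Int × Int :=
      if first < second then (second, first, 1, 0) else (first, second, 0, 1)
    let st := (PySem.List.pyRange 2 (PySem.List.len list_num) 1).foldl (aStep list_num) st0
    [(st.1, st.2.2.1), (st.2.1, st.2.2.2)]
  | _ => []   -- Python raises ValueError here (unpacking fewer than 2 values); excluded by Pre_

-- ===== PORT B =====
-- loop body of B's second pass, named for use in the proofs
def bStep (f_index : Int) (best : Option (Int × Int)) (p : Int × Int) : Option (Int × Int) :=
  if p.1 = f_index then best
  else
    match best with
    | none => some (p.2, p.1)
    | some b => if b.1 < p.2 then some (p.2, p.1) else best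

def second_max_modified_alt (list_num : List Int) : List (Int × Int) :=
  if list_num.length < 2 then []   -- Python raises ValueError here; excluded by Pre_
  else
    let f_val := (PySem.List.max? list_num (fun y => y)).getD 0
    let f_index : Int := ((PySem.List.index? list_num f_val).getD 0 : Nat)
    let best := (PySem.List.enumerate list_num 0).foldl (bStep f_index) none
    [(f_val, f_index), best.getD (0, 0)]

-- ===== PRECONDITION & SPEC =====
-- Pre_ excludes lists of fewer than two elements, on which Python A raises ValueError.
def Pre_second_max_modified (list_num : List Int) : Prop := 2 ≤ list_num.length
instance (list_num : List Int) : Decidable (Pre_second_max_modified list_num) := by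
  unfold Pre_second_max_modified; infer_instance
def pvWitness_second_max_modified : List Int := [3, 1, 4, 1, 5]

def Spec_second_max_modified (list_num : List Int) (out : List (Int × Int)) : Prop := out = second_max_modified_alt list_num
instance (list_num : List Int) (out : List (Int × Int)) : Decidable (Spec_second_max_modified list_num out) := by unfold Spec_second_max_modified; infer_instance

-- ===== CLAIM (what is proved, stated in full; the proofs are below) =====
def Claim_equal_second_max_modified : Prop := ∀ (list_num : List Int), Dom_second_max_modified list_num → Pre_second_max_modified list_num → Spec_second_max_modified list_num (second_max_modified list_num)

-- ===== LEMMAS AND PROOFS =====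

-- abbreviations for B's three quantities (proof-side only)
def mx (xs : List Int) : Int := (PySem.List.max? xs (fun y => y)).getD 0
def fi (xs : List Int) : Int := ((PySem.List.index? xs (mx xs)).getD 0 : Nat)
def bestOpt (xs : List Int) : Option (Int × Int) :=
  (PySem.List.enumerate xs 0).foldl (bStep (fi xs)) none

lemma mx_cons (a : Int) (t : List Int) : mx (a :: t) = t.foldl max a := by
  simp [mx, PySem.List.max?_id_cons]

lemma mx_append_singleton (a x : Int) (t : List Int) :
    mx ((a :: t) ++ [x]) = max (mx (a :: t)) x := by
  simp [mx_cons, List.foldl_append]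

lemma mx_mem (a : Int) (t : List Int) : mx (a :: t) ∈ a :: t := by
  have h : PySem.List.max? (a :: t) (fun y => y) = some (t.foldl max a) :=
    PySem.List.max?_id_cons a t
  have := PySem.List.max?_mem h
  simpa [mx_cons] using this

lemma mx_isMax (a : Int) (t : List Int) : ∀ y ∈ a :: t, y ≤ mx (a :: t) := by
  have h : PySem.List.max? (a :: t) (fun y => y) = some (t.foldl max a) :=
    PySem.List.max?_id_cons a t
  intro y hy
  have := PySem.List.max?_isMax h y hy
  simpa [mx_cons] using this

lemma fi_append_of_le (a x : Int) (t : List Int) (h : x ≤ mx (a :: t)) :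
    fi ((a :: t) ++ [x]) = fi (a :: t) := by
  have hmx : mx ((a :: t) ++ [x]) = mx (a :: t) := by
    rw [mx_append_singleton]; omega
  unfold fi
  rw [hmx, PySem.List.index?_append_of_mem _ (mx_mem a t)]

lemma fi_append_of_lt (a x : Int) (t : List Int) (h : mx (a :: t) < x) :
    fi ((a :: t) ++ [x]) = (a :: t).length := by
  have hmx : mx ((a :: t) ++ [x]) = x := by
    rw [mx_append_singleton]; omega
  have hnot : x ∉ a :: t := by
    intro hm
    exact absurd (mx_isMax a t x hm) (by omega)
  unfold fi
  rw [hmx, PySem.List.index?_append_singleton_self _ x hnot]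
  simp

lemma fi_lt_length (a : Int) (t : List Int) : fi (a :: t) < ((a :: t).length : Int) := by
  unfold fi
  rcases h : PySem.List.index? (a :: t) (mx (a :: t)) with _ | k
  · rw [PySem.List.index?_eq_none_iff] at h
    exact absurd (mx_mem a t) h
  · obtain ⟨hk, -, -⟩ := PySem.List.getElem_of_index?_eq_some h
    simp only [Option.getD_some]
    exact_mod_cast hk

-- first-pass characterisation: the no-skip running-max fold over enumerate is (mx, fi)
lemma runmax (a : Int) (t : List Int) :
    (PySem.List.enumerate (a :: t) 0).foldl
      (fun best p =>
        match best with
        | none => some (p.2, p.1)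
        | some b => if b.1 < p.2 then some (p.2, p.1) else best) none
      = some (mx (a :: t), fi (a :: t)) := by
  induction t using List.reverseRecOn with
  | nil =>
    simp [PySem.List.enumerate, mx, fi, PySem.List.max?, PySem.List.index?]
  | append_singleton t x ih =>
    rw [show a :: (t ++ [x]) = (a :: t) ++ [x] from rfl,
        PySem.List.enumerate_append, List.foldl_append, ih]
    simp only [PySem.List.enumerate, List.foldl_cons, List.foldl_nil]
    by_cases h : mx (a :: t) < x
    · rw [if_pos h, fi_append_of_lt a x t h]
      have : mx ((a :: t) ++ [x]) = x := by rw [mx_append_singleton]; omega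
      rw [this]; simp
    · rw [if_neg h, fi_append_of_le a x t (by omega)]
      have : mx ((a :: t) ++ [x]) = mx (a :: t) := by rw [mx_append_singleton]; omega
      rw [this]

-- skipping an index that never occurs makes bStep the no-skip fold
lemma fold_bStep_of_notin (xs : List Int) (f : Int)
    (hf : ∀ p ∈ PySem.List.enumerate xs 0, p.1 ≠ f) (init : Option (Int × Int)) :
    (PySem.List.enumerate xs 0).foldl (bStep f) init
      = (PySem.List.enumerate xs 0).foldl
          (fun best p =>
            match best with
            | none => some (p.2, p.1)
            | some b => if b.1 < p.2 then some (p.2, p.1) else best) init := by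
  apply PySem.List.foldl_congr_mem
  intro acc p hp
  simp [bStep, hf p hp]

lemma enumerate_fst_lt (xs : List Int) (p : Int × Int)
    (hp : p ∈ PySem.List.enumerate xs 0) : 0 ≤ p.1 ∧ p.1 < (xs.length : Int) := by
  rw [PySem.List.mem_enumerate_iff] at hp
  obtain ⟨k, hk, rfl⟩ := hp
  constructor
  · simp
  · simp
    omega

-- MAIN INVARIANT: A's loop state is exactly B's three quantities
lemma main_invariant (t : List Int) (a b : Int) :
    ∃ v i, bestOpt (a :: b :: t) = some (v, i) ∧
      (PySem.List.pyRange 2 (PySem.List.len (a :: b :: t)) 1).foldl (aStep (a :: b :: t))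
          (if a < b then (b, a, 1, 0) else (a, b, 0, 1))
        = (mx (a :: b :: t), v, fi (a :: b :: t), i) := by
  induction t using List.reverseRecOn with
  | nil =>
    have hrange : PySem.List.pyRange 2 (PySem.List.len [a, b]) 1 = [] := by
      rw [PySem.List.len_eq]
      exact PySem.List.pyRange_one_eq_nil (by simp)
    by_cases hab : a < b
    · have hmx : mx [a, b] = b := by rw [mx_cons]; simp; omega
      have hfi : fi [a, b] = 1 := by
        unfold fi
        rw [hmx, PySem.List.index?_cons_of_ne [b] (by omega : a ≠ b),
            PySem.List.index?_cons_self]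
        rfl
      refine ⟨a, 0, ?_, ?_⟩
      · simp [bestOpt, hfi, PySem.List.enumerate, bStep]
      · rw [hrange, hmx, hfi]
        simp [hab]
    · have hmx : mx [a, b] = a := by rw [mx_cons]; simp; omega
      have hfi : fi [a, b] = 0 := by
        unfold fi
        rw [hmx, PySem.List.index?_cons_self a [b]]
        rfl
      refine ⟨b, 1, ?_, ?_⟩
      · simp [bestOpt, hfi, PySem.List.enumerate, bStep]
      · rw [hrange, hmx, hfi]
        simp [hab]
  | append_singleton t x ih =>
    obtain ⟨v, i, hbest, hfold⟩ := ih
    have hx : a :: b :: (t ++ [x]) = (a :: b :: t) ++ [x] := rfl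
    have hL2 : 2 ≤ (a :: b :: t).length := by simp
    -- the appended element, read through pyGetD
    have hlast : PySem.List.pyGetD ((a :: b :: t) ++ [x]) ((a :: b :: t).length : Int) 0 = x := by
      rw [PySem.List.pyGetD_of_nonneg _ _ (by positivity),
          Int.toNat_natCast, List.getD_append_right _ _ _ _ (le_refl _)]
      simp
    -- A's fold over the longer list = one more step after A's fold over the prefix
    have hA : (PySem.List.pyRange 2 (PySem.List.len ((a :: b :: t) ++ [x])) 1).foldl
          (aStep ((a :: b :: t) ++ [x])) (if a < b then (b, a, 1, 0) else (a, b, 0, 1))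
        = aStep ((a :: b :: t) ++ [x]) (mx (a :: b :: t), v, fi (a :: b :: t), i)
            (((a :: b :: t).length : Int)) := by
      rw [PySem.List.len_eq, show ((((a :: b :: t) ++ [x]).length : Int))
            = ((a :: b :: t).length : Int) + 1 by simp,
          PySem.List.pyRange_one_succ_right (by exact_mod_cast hL2), List.foldl_append]
      simp only [List.foldl_cons, List.foldl_nil]
      congr 1
      rw [PySem.List.foldl_congr_mem _ (aStep ((a :: b :: t) ++ [x])) (aStep (a :: b :: t)) _ ?_]
      · rw [← PySem.List.len_eq]; exact hfold
      · intro st j hj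
        rw [PySem.List.mem_pyRange_one] at hj
        simp only [List.length_cons] at hj
        have hget : PySem.List.pyGetD ((a :: b :: t) ++ [x]) j 0
            = PySem.List.pyGetD (a :: b :: t) j 0 := by
          rw [PySem.List.pyGetD_eq_getElem _ _ (by omega) (by simp; omega),
              PySem.List.pyGetD_eq_getElem _ _ (by omega) (by simp; omega)]
          exact List.getElem_append_left (by simp; omega)
        simp only [List.cons_append] at hget
        simp [aStep, hget]
    -- B's enumerate over the longer list
    have henum : PySem.List.enumerate ((a :: b :: t) ++ [x]) 0
        = PySem.List.enumerate (a :: b :: t) 0 ++ [(((a :: b :: t).length : Int), x)] := by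
      rw [PySem.List.enumerate_append]
      simp [PySem.List.enumerate]
    by_cases hcase : mx (a :: b :: t) < x
    · -- x is the new maximum: the runner-up becomes the old maximum
      have hmx' : mx ((a :: b :: t) ++ [x]) = x := by
        rw [mx_append_singleton]; omega
      have hfi' : fi ((a :: b :: t) ++ [x]) = ((a :: b :: t).length : Int) := by
        rw [fi_append_of_lt _ _ _ hcase]
      refine ⟨mx (a :: b :: t), fi (a :: b :: t), ?_, ?_⟩
      · rw [hx]
        unfold bestOpt
        rw [henum, List.foldl_append, hfi']
        simp only [List.foldl_cons, List.foldl_nil]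
        rw [fold_bStep_of_notin _ _ ?_ none, runmax]
        · simp [bStep]
        · intro p hp
          have := enumerate_fst_lt _ p hp
          omega
      · rw [hx]
        rw [hA, hmx', hfi']
        simp only [List.cons_append, List.length_cons] at hlast
        push_cast at hlast ⊢
        simp [aStep, hlast, hcase]
    · -- the old maximum survives; only the runner-up may be updated
      have hmx' : mx ((a :: b :: t) ++ [x]) = mx (a :: b :: t) := by
        rw [mx_append_singleton]; omega
      have hfi' : fi ((a :: b :: t) ++ [x]) = fi (a :: b :: t) := by
        rw [fi_append_of_le _ _ _ (by omega)]
      have hne : ¬ (((a :: b :: t).length : Int) = fi ((a :: b :: t) ++ [x])) := by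
        rw [hfi']
        have := fi_lt_length a (b :: t)
        omega
      have hbest' : bestOpt ((a :: b :: t) ++ [x])
          = if v < x then some (x, ((a :: b :: t).length : Int)) else some (v, i) := by
        unfold bestOpt
        rw [henum, List.foldl_append, hfi']
        rw [show (PySem.List.enumerate (a :: b :: t) 0).foldl
              (bStep (fi (a :: b :: t))) none = bestOpt (a :: b :: t) from rfl, hbest]
        simp only [List.foldl_cons, List.foldl_nil, bStep]
        rw [if_neg (by rw [hfi'] at hne; exact hne)]
      by_cases hv : v < x
      · refine ⟨x, ((a :: b :: t).length : Int), ?_, ?_⟩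
        · rw [hx, hbest', if_pos hv]
        · rw [hx]
          rw [hA, hmx', hfi']
          simp only [List.cons_append, List.length_cons] at hlast
          push_cast at hlast ⊢
          simp [aStep, hlast, hcase, hv]
      · refine ⟨v, i, ?_, ?_⟩
        · rw [hx, hbest', if_neg hv]
        · rw [hx]
          rw [hA, hmx', hfi']
          simp only [List.cons_append, List.length_cons] at hlast
          push_cast at hlast ⊢
          simp [aStep, hlast, hcase, hv]

-- ===== VERDICT (by name: the statement is the Claim_ definition above) =====
theorem second_max_modified_spec : Claim_equal_second_max_modified := by
  intro list_num _ hpre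
  unfold Spec_second_max_modified
  match list_num with
  | [] => simp [Pre_second_max_modified] at hpre
  | [a] => simp [Pre_second_max_modified] at hpre
  | a :: b :: t =>
    obtain ⟨v, i, hbest, hfold⟩ := main_invariant t a b
    simp only [second_max_modified, second_max_modified_alt, hfold]
    rw [if_neg (by simp)]
    show _ = [(mx (a :: b :: t), fi (a :: b :: t)),
      ((PySem.List.enumerate (a :: b :: t) 0).foldl (bStep (fi (a :: b :: t))) none).getD (0, 0)]
    rw [show (PySem.List.enumerate (a :: b :: t) 0).foldl (bStep (fi (a :: b :: t))) none
          = bestOpt (a :: b :: t) from rfl, hbest]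
    rfl
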